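-- pv_equiv track=rewrite | github.com/wzygxr/shuati | class089_MajorityElement/comprehensive_test.py | find_minimum_index_valid_split
-- ===== SOURCE A (Python) =====
-- from typing import List
--
-- def find_minimum_index_valid_split(nums: List[int]) -> int:
--     """
--     合法分割的最小下标
--
--     Args:
--         nums: 输入数组
--
--     Returns:
--         最小分割下标，如果不存在则返回-1
--     """
--     # 第一步：使用Boyer-Moore投票算法找出候选元素
--     candidate = 0
--     count = 0
--
--     # 投票阶段：找出可能的支配元素
--     for num in nums:
--         if count == 0:
--             candidate = num
--             count = 1
--         elif num == candidate:
--             count += 1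
--         else:
--             count -= 1
--
--     # 第二步：统计候选元素在整个数组中的出现次数
--     count = 0
--     for num in nums:
--         if num == candidate:
--             count += 1
--
--     # 第三步：遍历所有可能的分割点，检查是否满足条件
--     n = len(nums)
--     left_count = 0  # 左半部分中候选元素的出现次数
--
--     # 遍历所有可能的分割点 i (0 <= i < n-1)
--     for i in range(n - 1):
--         # 更新左半部分中候选元素的出现次数
--         if nums[i] == candidate:
--             left_count += 1
--
--         # 计算右半部分中候选元素的出现次数
--         right_count = count - left_count
--
--         # 检查左半部分是否满足支配元素条件
--         left_valid = left_count * 2 > (i + 1)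
--
--         # 检查右半部分是否满足支配元素条件
--         right_valid = right_count * 2 > (n - i - 1)
--
--         # 如果两部分都满足条件，则找到了有效分割点
--         if left_valid and right_valid:
--             return i
--
--     # 不存在有效分割点
--     return -1
-- ===== SOURCE B (Python) =====
-- from collections import Counter
--
--
-- def find_minimum_index_valid_split(nums):
--     n = len(nums)
--     if n == 0:
--         return -1
--     candidate, total = Counter(nums).most_common(1)[0]
--     if 2 * total <= n:
--         return -1  # no overall majority => no half can be dominated on both sides
--     left = 0
--     for i, v in enumerate(nums[:-1]):
--         if v == candidate:
--             left += 1
--         if 2 * left > i + 1 and 2 * (total - left) > n - i - 1: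
--             return i
--     return -1
-- ===== Notes on version B (the rewrite author's own statement) =====
-- stated objective: simpler
-- what changed: B replaces A's two separate passes (Boyer-Moore voting, then a counting loop) by a single Counter whose most common entry gives both the candidate and its total count, adds an early -1 return when that count is not a strict majority, and scans prefixes via enumerate(nums[:-1]) instead of indexing over range(n-1).
import Mathlib
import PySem

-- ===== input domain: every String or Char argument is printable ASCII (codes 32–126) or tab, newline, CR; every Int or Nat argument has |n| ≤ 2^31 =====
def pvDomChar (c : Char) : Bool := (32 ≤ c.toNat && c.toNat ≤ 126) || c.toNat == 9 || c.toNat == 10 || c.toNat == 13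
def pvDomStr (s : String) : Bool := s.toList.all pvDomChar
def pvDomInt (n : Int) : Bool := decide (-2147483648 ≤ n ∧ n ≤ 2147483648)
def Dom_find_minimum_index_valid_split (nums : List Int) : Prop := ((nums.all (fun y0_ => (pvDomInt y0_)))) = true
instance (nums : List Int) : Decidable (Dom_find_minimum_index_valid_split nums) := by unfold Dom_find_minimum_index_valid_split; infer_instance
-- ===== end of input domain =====

-- B replaces A's Boyer–Moore voting pass and separate counting pass by a Counter
-- (candidate = most common key with its count) plus an early -1 return when no
-- majority exists; the prefix scan runs over enumerate(nums[:-1]).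

-- ===== PORT A =====
-- Boyer–Moore voting step (state = (candidate, count))
def voteStep (st : Int × Int) (num : Int) : Int × Int :=
  if st.2 = 0 then (num, 1)
  else if num = st.1 then (st.1, st.2 + 1)
  else (st.1, st.2 - 1)

-- the updated left_count ('if nums[i] == candidate: left_count += 1')
def newLeft (candidate left v : Int) : Int := if v = candidate then left + 1 else left

-- third loop of A: for i in range(n-1) with early return
def scanA (nums : List Int) (candidate total n : Int) : List Int → Int → Int
  | [], _ => -1
  | i :: rest, left =>
    if newLeft candidate left (PySem.List.pyGetD nums i 0) * 2 > i + 1 ∧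
       (total - newLeft candidate left (PySem.List.pyGetD nums i 0)) * 2 > n - i - 1
    then i
    else scanA nums candidate total n rest (newLeft candidate left (PySem.List.pyGetD nums i 0))

def find_minimum_index_valid_split (nums : List Int) : Int :=
  let st := nums.foldl voteStep (0, 0)
  let candidate := st.1
  let count := nums.foldl (fun c num => if num = candidate then c + 1 else c) (0 : Int)
  let n : Int := nums.length
  scanA nums candidate count n (PySem.List.pyRange 0 (n - 1) 1) 0

-- ===== PORT B =====
-- most_common(1)[0]: first pair with maximal count (stable max over the items)
def bestPair : List (Int × Int) → Int × Int → Int × Int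
  | [], best => best
  | p :: rest, best => bestPair rest (if p.2 > best.2 then p else best)

-- B's loop: for i, v in enumerate(nums[:-1]) with early return
def scanB (candidate total n : Int) : List (Int × Int) → Int → Int
  | [], _ => -1
  | (i, v) :: rest, left =>
    if 2 * newLeft candidate left v > i + 1 ∧
       2 * (total - newLeft candidate left v) > n - i - 1
    then i
    else scanB candidate total n rest (newLeft candidate left v)

-- Counter(nums).most_common(1)[0] (items is nonempty whenever this is reached)
def mostCommon1 : List (Int × Int) → Int × Int
  | [] => ((0 : Int), (0 : Int))
  | p :: rest => bestPair rest p

def find_minimum_index_valid_split_alt (nums : List Int) : Int :=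
  let n : Int := nums.length
  if n = 0 then -1
  else
    let best := mostCommon1 (PySem.Dict.counter nums).items
    if 2 * best.2 ≤ n then -1
    else scanB best.1 best.2 n
      (PySem.List.enumerate (PySem.List.slice nums none (some (-1))) 0) 0

-- ===== PRECONDITION & SPEC =====
def Spec_find_minimum_index_valid_split (nums : List Int) (out : Int) : Prop := out = find_minimum_index_valid_split_alt nums
instance (nums : List Int) (out : Int) : Decidable (Spec_find_minimum_index_valid_split nums out) := by unfold Spec_find_minimum_index_valid_split; infer_instance

-- ===== CLAIM (what is proved, stated in full; the proofs are below) =====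
def Claim_equal_find_minimum_index_valid_split : Prop := ∀ (nums : List Int), Dom_find_minimum_index_valid_split nums → Spec_find_minimum_index_valid_split nums (find_minimum_index_valid_split nums)

-- ===== LEMMAS AND PROOFS =====

-- one voting step preserves the bound 2·[a = x] + δ(x, st) ≤ 1 + δ(x, voteStep st a)
theorem vote_step_bound (c k a x : Int) (h : 0 ≤ k) :
    (if x = a then (2 : Int) else 0) + (if x = c then k else -k)
      ≤ 1 + (if x = (voteStep (c, k) a).1 then (voteStep (c, k) a).2
             else -(voteStep (c, k) a).2) := by
  unfold voteStep
  split_ifs <;> first | omega | (dsimp only; omega) | (simp; omega)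

theorem vote_step_nonneg (st : Int × Int) (a : Int) (h : 0 ≤ st.2) : 0 ≤ (voteStep st a).2 := by
  obtain ⟨c, k⟩ := st
  unfold voteStep
  by_cases e0 : k = 0 <;> by_cases e1 : a = c <;> simp_all <;> omega

-- Boyer–Moore invariant over the whole fold
theorem vote_inv (l : List Int) (st : Int × Int) (h : 0 ≤ st.2) :
    0 ≤ (l.foldl voteStep st).2 ∧
    ∀ x : Int, 2 * (l.count x : Int) + (if x = st.1 then st.2 else -st.2)
      ≤ l.length + (if x = (l.foldl voteStep st).1 then (l.foldl voteStep st).2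
                    else -(l.foldl voteStep st).2) := by
  induction l generalizing st with
  | nil => exact ⟨h, fun x => by simp⟩
  | cons a t ih =>
    have hstep := vote_step_nonneg st a h
    obtain ⟨h1, h2⟩ := ih (voteStep st a) hstep
    refine ⟨by simpa using h1, fun x => ?_⟩
    have h3 := h2 x
    have hc : ((a :: t).count x : Int) = (t.count x : Int) + (if x = a then 1 else 0) := by
      simp only [List.count_cons, beq_iff_eq]
      push_cast
      split_ifs <;> omega
    have key := vote_step_bound st.1 st.2 a x h
    have hfold : (a :: t).foldl voteStep st = t.foldl voteStep (voteStep st a) := rfl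
    rw [hfold, List.length_cons, hc]
    push_cast
    have : (if x = a then (2:Int) else 0) + (if x = st.1 then st.2 else -st.2)
        ≤ 1 + (if x = (voteStep st a).1 then (voteStep st a).2 else -(voteStep st a).2) := by
      simpa using key
    omega

-- if a strict majority m exists, the vote yields m
theorem vote_majority (nums : List Int) (m : Int)
    (hm : 2 * (nums.count m : Int) > (nums.length : Int)) :
    (nums.foldl voteStep (0, 0)).1 = m := by
  obtain ⟨h1, h2⟩ := vote_inv nums (0, 0) (by norm_num)
  have h3 := h2 m
  by_contra hne
  have h4 : (if m = ((0 : Int), (0 : Int)).1 then ((0 : Int), (0 : Int)).2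
      else -((0 : Int), (0 : Int)).2) = 0 := by
    split_ifs <;> simp
  rw [h4, if_neg (fun e => hne e.symm)] at h3
  omega

theorem scanA_no_majority (nums : List Int) (c total n : Int) (h : 2 * total ≤ n) :
    ∀ (rng : List Int) (left : Int), scanA nums c total n rng left = -1 := by
  intro rng
  induction rng with
  | nil => intro left; rfl
  | cons i rest ih =>
    intro left
    unfold scanA
    split_ifs with hc
    · omega
    · exact ih _

theorem bestPair_mem (l : List (Int × Int)) (p : Int × Int) : bestPair l p ∈ p :: l := by
  induction l generalizing p with
  | nil => simp [bestPair]
  | cons q rest ih =>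
    unfold bestPair
    rcases List.mem_cons.mp (ih (if q.2 > p.2 then q else p)) with h | h
    · rw [h]
      split_ifs <;> simp
    · simp [h]

theorem bestPair_max (l : List (Int × Int)) :
    ∀ (p q : Int × Int), q ∈ p :: l → q.2 ≤ (bestPair l p).2 := by
  induction l with
  | nil =>
    intro p q hq
    simp at hq
    subst hq
    simp [bestPair]
  | cons r rest ih =>
    intro p q hq
    unfold bestPair
    have hp : p.2 ≤ (if r.2 > p.2 then r else p).2 := by split_ifs <;> omega
    have hr : r.2 ≤ (if r.2 > p.2 then r else p).2 := by split_ifs <;> omega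
    rcases List.mem_cons.mp hq with h1 | h1
    · subst h1
      exact le_trans hp (ih _ _ (List.mem_cons_self ..))
    · rcases List.mem_cons.mp h1 with h2 | h2
      · subst h2
        exact le_trans hr (ih _ _ (List.mem_cons_self ..))
      · exact ih _ _ (List.mem_cons_of_mem _ h2)

-- two distinct values cannot both be counted more than half
theorem count_pair_le (l : List Int) (a b : Int) (hab : a ≠ b) :
    l.count a + l.count b ≤ l.length := by
  induction l with
  | nil => simp
  | cons x t ih =>
    simp only [List.count_cons, List.length_cons, beq_iff_eq]
    split_ifs with h1 h2 h2 <;> omega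

-- A's second loop is list counting
theorem count_foldl (l : List Int) (c acc : Int) :
    l.foldl (fun s num => if num = c then s + 1 else s) acc = acc + (l.count c : Int) := by
  have h := PySem.List.foldl_count_if (fun x => x == c) l acc
  simpa [List.count] using h

-- the two scans agree when run with the same candidate and total
theorem scan_eq (nums : List Int) (c t : Int) :
    ∀ (suffix : List Int) (k : Nat) (left : Int),
      suffix = nums.dropLast.drop k →
      scanA nums c t nums.length (PySem.List.pyRange (k : Int) ((nums.length : Int) - 1) 1) left
        = scanB c t nums.length (PySem.List.enumerate suffix (k : Int)) left := by
  intro suffix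
  induction suffix with
  | nil =>
    intro k left hs
    have hk : nums.dropLast.length ≤ k := by
      by_contra hlt
      push_neg at hlt
      have := List.drop_eq_nil_iff.mp hs.symm
      omega
    have hlen : nums.dropLast.length = nums.length - 1 := by simp
    rw [PySem.List.pyRange_one_eq_nil (by omega)]
    rfl
  | cons v rest ih =>
    intro k left hs
    have hklt : k < nums.dropLast.length := by
      by_contra hge
      push_neg at hge
      rw [List.drop_eq_nil_iff.mpr hge] at hs
      exact List.cons_ne_nil v rest hs
    have hlen : nums.dropLast.length = nums.length - 1 := by simp
    have hkn : k < nums.length := by omega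
    have hvrest : nums.dropLast.drop k = v :: rest := hs.symm
    have hv : nums.dropLast[k]'hklt = v := by
      have h0 : nums.dropLast[k + 0]? = some v := by
        rw [← List.getElem?_drop, hvrest]
        rfl
      rw [Nat.add_zero, List.getElem?_eq_getElem hklt] at h0
      exact Option.some.inj h0
    have hv' : nums[k]'hkn = v := by
      rw [← List.getElem_dropLast hklt, hv]
    have hget : PySem.List.pyGetD nums (k : Int) 0 = v := by
      rw [PySem.List.pyGetD_natCast]
      simp [List.getD, hkn, hv']
    rw [PySem.List.pyRange_one_cons (show (k : Int) < (nums.length : Int) - 1 by omega)]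
    rw [show PySem.List.enumerate (v :: rest) (k : Int)
        = ((k : Int), v) :: PySem.List.enumerate rest ((k : Int) + 1) from rfl]
    unfold scanA scanB
    rw [hget]
    set L := newLeft c left v with hL
    by_cases hcond : L * 2 > (k : Int) + 1 ∧ (t - L) * 2 > (nums.length : Int) - (k : Int) - 1
    · rw [if_pos hcond, if_pos ⟨by omega, by omega⟩]
    · rw [if_neg hcond, if_neg (fun h => hcond ⟨by omega, by omega⟩)]
      have hrest : rest = nums.dropLast.drop (k + 1) := by
        calc rest = (v :: rest).drop 1 := rfl
          _ = (nums.dropLast.drop k).drop 1 := by rw [hvrest]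
          _ = nums.dropLast.drop (k + 1) := by rw [List.drop_drop]
      have h := ih (k + 1) L hrest
      rw [Nat.cast_add, Nat.cast_one] at h
      exact h

-- the core equality, assembled by cases on the existence of a strict majority
theorem main_eq (nums : List Int) :
    find_minimum_index_valid_split nums = find_minimum_index_valid_split_alt nums := by
  simp only [find_minimum_index_valid_split, find_minimum_index_valid_split_alt]
  rw [count_foldl]
  by_cases hnil : nums = []
  · subst hnil; rfl
  rw [if_neg (by simpa using hnil)]
  -- the counter's items are nonempty
  obtain ⟨d, ds, hds⟩ := List.exists_cons_of_ne_nil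
    (show PySem.Set.ofList nums ≠ [] by
      obtain ⟨y, ys, rfl⟩ := List.exists_cons_of_ne_nil hnil
      intro hempty
      have : y ∈ PySem.Set.ofList (y :: ys) := (PySem.Set.mem_ofList _ _).mpr (by simp)
      rw [hempty] at this
      exact List.not_mem_nil this)
  have hitems : (PySem.Dict.counter nums).items
      = (d, (nums.count d : Int)) :: ds.map (fun k => (k, (nums.count k : Int))) := by
    rw [PySem.Dict.items_counter, hds]; rfl
  rw [hitems]
  simp only [mostCommon1]
  set best := bestPair (ds.map (fun k => (k, (nums.count k : Int)))) (d, (nums.count d : Int))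
    with hbest
  -- best is one of the counter's items: best = (k0, count k0) with k0 ∈ nums
  have hbmem := bestPair_mem (ds.map (fun k => (k, (nums.count k : Int)))) (d, (nums.count d : Int))
  rw [← hbest] at hbmem
  have hbmem' : best ∈ (PySem.Set.ofList nums).map (fun k => (k, (nums.count k : Int))) := by
    rw [hds]; simpa using hbmem
  obtain ⟨k0, hk0set, hk0⟩ := List.mem_map.mp hbmem'
  have hk0mem : k0 ∈ nums := (PySem.Set.mem_ofList _ _).mp hk0set
  by_cases hex : ∃ m, m ∈ nums ∧ 2 * (nums.count m : Int) > (nums.length : Int)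
  · -- a strict majority exists: both sides find it
    obtain ⟨m, hmmem, hm⟩ := hex
    have hcand : (nums.foldl voteStep (0, 0)).1 = m := vote_majority nums m hm
    -- best.2 ≥ count m, hence k0 = m
    have hmitem : (m, (nums.count m : Int))
        ∈ (PySem.Set.ofList nums).map (fun k => (k, (nums.count k : Int))) :=
      List.mem_map.mpr ⟨m, (PySem.Set.mem_ofList _ _).mpr hmmem, rfl⟩
    have hmax : (nums.count m : Int) ≤ best.2 := by
      have := bestPair_max (ds.map (fun k => (k, (nums.count k : Int))))
        (d, (nums.count d : Int)) (m, (nums.count m : Int)) (by rw [hds] at hmitem; simpa using hmitem)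
      simpa [← hbest] using this
    have hk0m : k0 = m := by
      by_contra hne
      have hsum := count_pair_le nums k0 m hne
      have hb2 : best.2 = (nums.count k0 : Int) := by rw [← hk0]
      rw [hb2] at hmax
      omega
    have hb : best = (m, (nums.count m : Int)) := by
      rw [← hk0, hk0m]
    rw [hcand, hb]
    rw [if_neg (by simpa using (by omega : ¬ 2 * (nums.count m : Int) ≤ (nums.length : Int)))]
    have := scan_eq nums m (nums.count m) nums.dropLast 0 0 (by simp)
    simpa [PySem.List.slice_to_neg_one] using this
  · -- no strict majority: both sides return -1
    push_neg at hex
    have hA : 2 * ((nums.count (nums.foldl voteStep (0, 0)).1 : Nat) : Int)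
        ≤ (nums.length : Int) := by
      set c := (nums.foldl voteStep (0, 0)).1
      by_cases hc : c ∈ nums
      · exact hex c hc
      · rw [List.count_eq_zero_of_not_mem hc]
        simp
    rw [scanA_no_majority _ _ _ _ (by simpa using hA) _ _]
    have hB : 2 * best.2 ≤ (nums.length : Int) := by
      have hb2 : best.2 = (nums.count k0 : Int) := by rw [← hk0]
      rw [hb2]
      exact hex k0 hk0mem
    rw [if_pos hB]

-- ===== VERDICT (by name: the statement is the Claim_ definition above) =====
theorem find_minimum_index_valid_split_spec : Claim_equal_find_minimum_index_valid_split := by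
  intro nums _
  exact main_eq nums
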